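-- pv_equiv track=rewrite | github.com/Kristoff-starling/OJ-Programmes | LeetCode/[LCCI08.13]PileBox.py | pileBox
-- ===== SOURCE A (Python) =====
-- from typing import List
--
-- def pileBox(box: List[List[int]]) -> int:
--     box, n = sorted(box), len(box)
--     dp = [0] * n; dp[0] = box[0][2]
--     for i in range(1, n):
--         dp[i] = box[i][2]
--         for j in range(i):
--             if box[i][0] > box[j][0] and box[i][1] > box[j][1] and box[i][2] > box[j][2]:
--                 dp[i] = max(dp[i], dp[j] + box[i][2])
--     return max(dp)
-- ===== SOURCE B (Python) =====
-- from typing import List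
--
-- def pileBox(box: List[List[int]]) -> int:
--     # Fixed-point iteration over the strict-dominance DAG: no sort needed.
--     # h[i] converges to the best stack weight with box i on top; dominance is
--     # acyclic, so n rounds always suffice (early exit once stable).
--     n = len(box)
--     doms = [[j for j in range(n)
--              if box[j][0] < box[i][0] and box[j][1] < box[i][1] and box[j][2] < box[i][2]]
--             for i in range(n)]
--     h = [b[2] for b in box]
--     for _ in range(n):
--         g = [box[i][2] + max([0] + [h[j] for j in doms[i]]) for i in range(n)]
--         if g == h:
--             break
--         h = g
--     return max(h)
-- ===== Notes on version B (the rewrite author's own statement) =====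
-- stated objective: alternative
-- what changed: B drops A's lexicographic sort and order-indexed DP and instead iterates the chain-height vector to a fixed point over the strict-dominance DAG (dominator index lists built once, rounds until stable).
import Mathlib
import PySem

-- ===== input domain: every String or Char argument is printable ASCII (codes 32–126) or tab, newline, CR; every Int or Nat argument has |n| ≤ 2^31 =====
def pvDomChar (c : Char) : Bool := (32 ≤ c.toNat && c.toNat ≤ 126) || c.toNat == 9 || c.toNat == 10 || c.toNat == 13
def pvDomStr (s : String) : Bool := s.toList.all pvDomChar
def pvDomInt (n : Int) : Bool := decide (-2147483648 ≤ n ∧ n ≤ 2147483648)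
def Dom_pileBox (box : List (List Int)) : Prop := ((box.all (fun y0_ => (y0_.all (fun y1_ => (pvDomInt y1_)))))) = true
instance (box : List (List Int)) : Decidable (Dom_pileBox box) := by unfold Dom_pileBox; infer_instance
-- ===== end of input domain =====

-- B replaces the sort-then-DP with fixed-point iteration of the chain heights over the
-- strict-dominance DAG (no sort); objective: alternative (not measured faster).

-- Python max(l) on a nonempty list of ints (raises ValueError on [], excluded by Pre_)
def pyMax (l : List Int) : Int :=
  match l with
  | [] => 0
  | x :: t => t.foldl max x

-- ===== PORT A =====
-- box[i][0] > box[j][0] and box[i][1] > box[j][1] and box[i][2] > box[j][2] (indices in range under Pre_)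
def aDom (u v : List Int) : Bool :=
  decide (u.getD 0 0 < v.getD 0 0) && decide (u.getD 1 0 < v.getD 1 0) && decide (u.getD 2 0 < v.getD 2 0)

-- one iteration of A's outer loop: dp[i] = box[i][2]; inner loop over the earlier (box, dp) pairs
def aStep (seen : List (List Int × Int)) (si : List Int) : List (List Int × Int) :=
  let base := si.getD 2 0
  let d := seen.foldl (fun acc p => if aDom p.1 si then max acc (p.2 + base) else acc) base
  seen ++ [(si, d)]

def pileBox (box : List (List Int)) : Int :=
  match PySem.List.sorted box (fun x => x) false with
  | [] => 0  -- Python raises IndexError on dp[0] here (box = []); excluded by Pre_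
  | b0 :: rest => pyMax ((rest.foldl aStep [(b0, b0.getD 2 0)]).map Prod.snd)

-- ===== PORT B =====
def bDom (u v : List Int) : Bool :=
  decide (u.getD 0 0 < v.getD 0 0) && decide (u.getD 1 0 < v.getD 1 0) && decide (u.getD 2 0 < v.getD 2 0)

-- doms = [[j for j in range(n) if box[j] strictly below box[i]] for i in range(n)]
def bDoms (box : List (List Int)) : List (List Nat) :=
  (List.range box.length).map (fun i =>
    (List.range box.length).filter (fun j => bDom (box.getD j []) (box.getD i [])))

-- one round: g = [box[i][2] + max([0] + [h[j] for j in doms[i]]) for i in range(n)]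
def bStep (box : List (List Int)) (doms : List (List Nat)) (h : List Int) : List Int :=
  (List.range box.length).map (fun i =>
    (box.getD i []).getD 2 0 + ((doms.getD i []).map (fun j => h.getD j 0)).foldl max 0)

-- the for-loop with the early exit 'if g == h: break'
def bLoop (box : List (List Int)) (doms : List (List Nat)) : Nat → List Int → List Int
  | 0, h => h
  | k + 1, h =>
    let g := bStep box doms h
    if g = h then h else bLoop box doms k g

def pileBox_alt (box : List (List Int)) : Int :=
  pyMax (bLoop box (bDoms box) box.length (box.map (fun b => b.getD 2 0)))

-- ===== PRECONDITION & SPEC =====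
-- Pre_ excludes exactly the inputs where Python A raises: the empty list (IndexError on dp[0])
-- and boxes with fewer than 3 dimensions (IndexError on box[i][2]).
def Pre_pileBox (box : List (List Int)) : Prop := box ≠ [] ∧ ∀ b ∈ box, 3 ≤ b.length
instance (box : List (List Int)) : Decidable (Pre_pileBox box) := by unfold Pre_pileBox; infer_instance
def pvWitness_pileBox : List (List Int) := [[2, 2, 2], [1, 1, 1]]

def Spec_pileBox (box : List (List Int)) (out : Int) : Prop := out = pileBox_alt box
instance (box : List (List Int)) (out : Int) : Decidable (Spec_pileBox box out) := by unfold Spec_pileBox; infer_instance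

-- ===== CLAIM (what is proved, stated in full; the proofs are below) =====
def Claim_equal_pileBox : Prop := ∀ (box : List (List Int)), Dom_pileBox box → Pre_pileBox box → Spec_pileBox box (pileBox box)

-- ===== LEMMAS AND PROOFS =====

-- the common value both programs compute: F P k v = best weight of a strict-dominance
-- chain of at most k+1 boxes from the pool P topped by v
def F (P : List (List Int)) : Nat → List Int → Int
  | 0, v => v.getD 2 0
  | k + 1, v => v.getD 2 0 + ((P.filter (fun u => aDom u v)).map (F P k)).foldl max 0

theorem foldl_max_perm (l₁ l₂ : List Int) (h : l₁.Perm l₂) (a : Int) :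
    l₁.foldl max a = l₂.foldl max a := h.foldl_eq a

theorem F_perm (P Q : List (List Int)) (h : P.Perm Q) : ∀ k v, F P k v = F Q k v := by
  intro k
  induction k with
  | zero => intro v; rfl
  | succ k ih =>
    intro v
    have hmap : ∀ l : List (List Int), l.map (F P k) = l.map (F Q k) :=
      fun l => List.map_congr_left (fun u _ => ih u)
    have hperm : ((P.filter (fun u => aDom u v)).map (F Q k)).Perm
        ((Q.filter (fun u => aDom u v)).map (F Q k)) := (h.filter _).map _
    simp only [F, hmap, foldl_max_perm _ _ hperm]

theorem pyMax_perm (l₁ l₂ : List Int) (h : l₁.Perm l₂) (hne : l₁ ≠ []) : pyMax l₁ = pyMax l₂ := by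
  cases l₁ with
  | nil => exact absurd rfl hne
  | cons x t =>
    cases l₂ with
    | nil => exact absurd h.symm (by simp)
    | cons y s =>
      have h1 := PySem.List.max?_id_cons (x := x) (t := t)
      have h2 := PySem.List.max?_id_cons (x := y) (t := s)
      have hm1 : t.foldl max x ∈ x :: t := by
        have := PySem.List.max?_mem h1; simpa using this
      have hm2 : s.foldl max y ∈ y :: s := by
        have := PySem.List.max?_mem h2; simpa using this
      have hle1 : ∀ z ∈ x :: t, z ≤ t.foldl max x := by
        have := PySem.List.max?_isMax h1; simpa using this
      have hle2 : ∀ z ∈ y :: s, z ≤ s.foldl max y := by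
        have := PySem.List.max?_isMax h2; simpa using this
      simp only [pyMax]
      exact le_antisymm (hle2 _ (h.mem_iff.mp hm1)) (hle1 _ (h.mem_iff.mpr hm2))

theorem map_getD_range {α : Type} (l : List α) (d : α) :
    (List.range l.length).map (fun j => l.getD j d) = l := by
  induction l with
  | nil => rfl
  | cons x t ih =>
    simp only [List.length_cons, List.range_succ_eq_map, List.map_cons, List.map_map]
    simpa [Function.comp, List.getD_cons_succ] using congrArg (List.cons x) ih

theorem getD_map_lt {α β : Type} (l : List α) (g : α → β) (j : Nat) (hj : j < l.length)
    (d : β) (d' : α) : (l.map g).getD j d = g (l.getD j d') := by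
  simp [List.getD_eq_getElem?_getD, List.getElem?_map, List.getElem?_eq_getElem hj]

-- the index-filtered map equals the value-filtered map

theorem map_filter_range (box : List (List Int)) (Q : List Int → Bool) (g : List Int → Int) :
    ((List.range box.length).filter (fun j => Q (box.getD j []))).map (fun j => g (box.getD j []))
      = (box.filter Q).map g := by
  have h2 : box.filter Q = (((List.range box.length).map (fun j => box.getD j [])).filter Q) := by
    rw [map_getD_range]
  rw [h2, List.filter_map, List.map_map]
  rfl

-- one round advances the fuel

theorem bStep_spec (box : List (List Int)) (k : Nat) :
    bStep box (bDoms box) (box.map (F box k)) = box.map (F box (k + 1)) := by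
  have map_eq_map_range : ∀ {α β : Type} (l : List α) (d : α) (g : α → β),
      l.map g = (List.range l.length).map (fun i => g (l.getD i d)) := by
    intro α β l d g
    induction l with
    | nil => rfl
    | cons x t ih =>
      simp only [List.map_cons, List.length_cons, List.range_succ_eq_map, List.map_map]
      simpa [Function.comp, List.getD_cons_succ] using congrArg (List.cons (g x)) ih
  have hbox : box.map (F box (k+1)) = (List.range box.length).map (fun i => F box (k+1) (box.getD i [])) :=
    map_eq_map_range box [] (F box (k+1))
  rw [bStep, hbox]
  apply List.map_congr_left
  intro i hi
  have hi' : i < box.length := by simpa using hi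
  have hdoms : (bDoms box).getD i [] =
      (List.range box.length).filter (fun j => bDom (box.getD j []) (box.getD i [])) := by
    rw [bDoms, getD_map_lt (List.range box.length) _ i (by simpa using hi') [] 0]
    congr 1
    simp [List.getD_eq_getElem?_getD, List.getElem?_range hi']
  rw [hdoms]
  have hmap : ((List.range box.length).filter
        (fun j => bDom (box.getD j []) (box.getD i []))).map
        (fun j => (box.map (F box k)).getD j 0)
      = ((List.range box.length).filter
        (fun j => bDom (box.getD j []) (box.getD i []))).map
        (fun j => F box k (box.getD j [])) := by
    apply List.map_congr_left
    intro j hj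
    have hj' : j < box.length := by
      have := List.of_mem_filter hj
      have hjr := List.mem_of_mem_filter hj
      simpa using hjr
    exact getD_map_lt box (F box k) j hj' 0 []
  rw [hmap, map_filter_range box (fun u => bDom u (box.getD i [])) (F box k)]
  show (box.getD i []).getD 2 0 + _ = F box (k+1) (box.getD i [])
  simp only [F]
  rfl

theorem F_stable (box : List (List Int)) (k : Nat)
    (hfix : box.map (F box (k+1)) = box.map (F box k)) :
    ∀ m, box.map (F box (m + k)) = box.map (F box k) := by
  intro m
  induction m with
  | zero => rw [Nat.zero_add]
  | succ m ih =>
    have he : m + 1 + k = (m + k) + 1 := by omega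
    rw [he]
    calc box.map (F box ((m + k) + 1)) = bStep box (bDoms box) (box.map (F box (m + k))) :=
          (bStep_spec box (m+k)).symm
      _ = bStep box (bDoms box) (box.map (F box k)) := by rw [ih]
      _ = box.map (F box (k+1)) := bStep_spec box k
      _ = box.map (F box k) := hfix

theorem bLoop_spec (box : List (List Int)) :
    ∀ m k, bLoop box (bDoms box) m (box.map (F box k)) = box.map (F box (m + k)) := by
  intro m
  induction m with
  | zero => intro k; rw [Nat.zero_add]; rfl
  | succ m ih =>
    intro k
    show (if bStep box (bDoms box) (box.map (F box k)) = box.map (F box k) then box.map (F box k)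
          else bLoop box (bDoms box) m (bStep box (bDoms box) (box.map (F box k))))
        = box.map (F box (m + 1 + k))
    rw [bStep_spec]
    by_cases hfix : box.map (F box (k+1)) = box.map (F box k)
    · rw [if_pos hfix]
      exact (F_stable box k hfix (m+1)).symm
    · rw [if_neg hfix, ih (k+1)]
      have he : m + (k + 1) = m + 1 + k := by omega
      rw [he]

theorem pileBox_alt_eq (box : List (List Int)) :
    bLoop box (bDoms box) box.length (box.map (fun b => b.getD 2 0))
      = box.map (F box box.length) := by
  have h0 : box.map (fun b => b.getD 2 0) = box.map (F box 0) :=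
    List.map_congr_left (fun _ _ => rfl)
  rw [h0, bLoop_spec box box.length 0, Nat.add_zero]

theorem aDom_lt (u v : List Int) (hv : v ≠ []) (h : aDom u v = true) : u < v := by
  have h0 : u.getD 0 0 < v.getD 0 0 := by
    simp only [aDom, Bool.and_eq_true, decide_eq_true_eq] at h
    exact h.1.1
  cases v with
  | nil => exact absurd rfl hv
  | cons b tv =>
    cases u with
    | nil => exact List.nil_lt_cons b tv
    | cons a tu =>
      rw [List.cons_lt_cons_iff]
      exact Or.inl (by simpa using h0)

theorem aDom_irrefl (v : List Int) : aDom v v = false := by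
  simp [aDom]

theorem filter_localize (s p q : List (List Int)) (v : List Int)
    (hs : s.Pairwise (· ≤ ·)) (hd : s = p ++ v :: q) (hv : v ≠ []) :
    s.filter (fun u => aDom u v) = p.filter (fun u => aDom u v) := by
  subst hd
  rw [List.filter_append, List.filter_cons]
  have hq : ∀ u ∈ q, v ≤ u := by
    have h2 := (List.pairwise_append.mp hs).2.1
    exact fun u hu => List.rel_of_pairwise_cons h2 hu
  have hqnil : q.filter (fun u => aDom u v) = [] := by
    rw [List.filter_eq_nil_iff]
    intro u hu hdom
    exact absurd (aDom_lt u v hv hdom) (not_lt.mpr (hq u hu))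
  rw [aDom_irrefl, hqnil]
  simp

theorem stab (s : List (List Int)) (hs : s.Pairwise (· ≤ ·)) (hne : ∀ u ∈ s, u ≠ []) :
    ∀ i, ∀ (hi : i < s.length), ∀ k, i ≤ k → F s k s[i] = F s i s[i] := by
  intro i
  induction i using Nat.strong_induction_on with
  | _ i ih =>
    intro hi k hik
    have hdecomp : s = s.take i ++ s[i] :: s.drop (i + 1) := by
      rw [List.getElem_cons_drop, List.take_append_drop]
    have hloc := filter_localize s (s.take i) (s.drop (i+1)) s[i] hs hdecomp
      (hne s[i] (List.getElem_mem hi))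
    cases i with
    | zero =>
      cases k with
      | zero => rfl
      | succ k =>
        simp only [F, hloc]
        simp
    | succ j =>
      cases k with
      | zero => omega
      | succ k' =>
        simp only [F, hloc]
        congr 2
        apply List.map_congr_left
        intro u hu
        have hu' : u ∈ s.take (j+1) := List.mem_of_mem_filter hu
        obtain ⟨a, ha, hua⟩ := List.mem_iff_getElem.mp hu'
        have haj : a < j + 1 := by
          have := ha
          rw [List.length_take] at this
          omega
        have hua' : u = s[a]'(by omega) := by
          rw [← hua, List.getElem_take]
        rw [hua']
        have h1 := ih a haj (by omega) k' (by omega)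
        have h2 := ih a haj (by omega) j (by omega)
        rw [h1, h2]

def GoodPairs (s : List (List Int)) (pairs : List (List Int × Int)) : Prop :=
  ∀ i (h : i < pairs.length), (pairs[i]).2 = F s i (pairs[i]).1

theorem inner_eq (v : List Int) (base : Int) (seen : List (List Int × Int)) :
    ∀ m : Int, seen.foldl (fun acc p => if aDom p.1 v then max acc (p.2 + base) else acc) (base + m)
      = base + ((seen.filter (fun p => aDom p.1 v)).map Prod.snd).foldl max m := by
  induction seen with
  | nil => intro m; rfl
  | cons p t ih =>
    intro m
    by_cases hdom : aDom p.1 v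
    · simp only [List.foldl_cons, List.filter_cons, hdom, if_true, List.map_cons]
      have hmax : max (base + m) (p.2 + base) = base + max m p.2 := by
        rw [add_comm p.2 base, max_add_add_left]
      rw [hmax, ih (max m p.2)]
    · simp only [List.foldl_cons, List.filter_cons, hdom, if_false, Bool.false_eq_true]
      exact ih m

theorem d_val (s : List (List Int)) (hs : s.Pairwise (· ≤ ·)) (hne : ∀ u ∈ s, u ≠ [])
    (seen : List (List Int × Int)) (v : List Int) (q : List (List Int))
    (hdecomp : s = seen.map Prod.fst ++ v :: q) (hgood : GoodPairs s seen) :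
    seen.foldl (fun acc p => if aDom p.1 v then max acc (p.2 + v.getD 2 0) else acc) (v.getD 2 0)
      = F s seen.length v := by
  have hv : v ≠ [] := hne v (by rw [hdecomp]; exact List.mem_append_right _ (List.mem_cons_self))
  subst hdecomp
  have hin := inner_eq v (v.getD 2 0) seen 0
  rw [add_zero] at hin
  rw [hin]
  cases hL : seen.length with
  | zero =>
    rw [List.length_eq_zero_iff.mp hL]
    simp [F]
  | succ L' =>
    have hloc := filter_localize _ (seen.map Prod.fst) q v hs rfl hv
    simp only [F, hloc]
    congr 1
    rw [List.filter_map]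
    rw [List.map_map]
    congr 1
    show List.map Prod.snd (List.filter (fun p => aDom p.1 v) seen)
        = List.map (fun p => F (seen.map Prod.fst ++ v :: q) L' p.1) (List.filter (fun p => aDom p.1 v) seen)
    apply List.map_congr_left
    intro p hp
    obtain ⟨i, hi, hpi⟩ := List.mem_iff_getElem.mp (List.mem_of_mem_filter hp)
    have hgi := hgood i hi
    rw [hpi] at hgi
    have hip : p.1 = (seen.map Prod.fst ++ v :: q)[i]'(by simp; omega) := by
      rw [List.getElem_append_left (by simpa using hi)]
      rw [List.getElem_map]
      rw [hpi]
    have hstab1 := stab _ hs hne i (by simp; omega) L' (by omega)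
    rw [hgi]
    show F _ i p.1 = F _ L' p.1
    rw [hip, hstab1]

theorem good_snoc (s : List (List Int)) (hs : s.Pairwise (· ≤ ·)) (hne : ∀ u ∈ s, u ≠ [])
    (seen : List (List Int × Int)) (v : List Int) (q : List (List Int))
    (hdecomp : s = seen.map Prod.fst ++ v :: q) (hgood : GoodPairs s seen) :
    GoodPairs s (aStep seen v) := by
  intro i hi
  simp only [aStep, List.length_append, List.length_cons, List.length_nil] at hi
  by_cases hlt : i < seen.length
  · show ((seen ++ [(v, _)])[i]).2 = F s i ((seen ++ [(v, _)])[i]).1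
    rw [List.getElem_append_left hlt]
    exact hgood i hlt
  · have hieq : i = seen.length := by omega
    subst hieq
    show ((seen ++ [(v, _)])[seen.length]).2 = F s seen.length ((seen ++ [(v, _)])[seen.length]).1
    rw [List.getElem_append_right (le_refl seen.length)]
    simp only [Nat.sub_self, List.getElem_cons_zero]
    exact d_val s hs hne seen v q hdecomp hgood

theorem foldA (s : List (List Int)) (hs : s.Pairwise (· ≤ ·)) (hne : ∀ u ∈ s, u ≠ []) :
    ∀ (q : List (List Int)) (seen : List (List Int × Int)),
      s = seen.map Prod.fst ++ q → GoodPairs s seen →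
      (q.foldl aStep seen).map Prod.fst = s ∧ GoodPairs s (q.foldl aStep seen) := by
  intro q
  induction q with
  | nil =>
    intro seen hdecomp hgood
    rw [List.append_nil] at hdecomp
    exact ⟨hdecomp.symm, hgood⟩
  | cons v q' ih =>
    intro seen hdecomp hgood
    rw [List.foldl_cons]
    apply ih
    · show s = (aStep seen v).map Prod.fst ++ q'
      simp only [aStep, List.map_append, List.map_cons, List.map_nil]
      rw [List.append_assoc]
      simpa using hdecomp
    · exact good_snoc s hs hne seen v q' hdecomp hgood


theorem goodpairs_singleton (s : List (List Int)) (b0 : List Int) :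
    GoodPairs s [(b0, b0.getD 2 0)] := by
  intro i hi
  simp only [List.length_cons, List.length_nil] at hi
  have : i = 0 := by omega
  subst this
  rfl

theorem sorted_pairwise_port (box : List (List Int)) :
    (PySem.List.sorted box (fun x => x) false).Pairwise (fun a b => a ≤ b) := by
  have h := PySem.List.sorted_pairwise (κ := List Int) box (fun x => x)
  have h2 : (PySem.List.sorted box (fun x => x) false)
      = @PySem.List.sorted (List Int) (List Int) List.instLinearOrder.toLT
          (@LinearOrder.toDecidableLT (List Int) List.instLinearOrder) box (fun x => x) false := by
    congr 1
  rw [h2]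
  exact h

theorem pileBox_eq_spec (box : List (List Int)) (h1 : box ≠ []) (h3 : ∀ b ∈ box, 3 ≤ b.length) :
    pileBox box = pyMax ((PySem.List.sorted box (fun x => x) false).map
      (F (PySem.List.sorted box (fun x => x) false) (PySem.List.sorted box (fun x => x) false).length)) := by
  have hperm : (PySem.List.sorted box (fun x => x) false).Perm box :=
    PySem.List.sorted_perm box _ false
  have hs : (PySem.List.sorted box (fun x => x) false).Pairwise (· ≤ ·) :=
    sorted_pairwise_port box
  have hne : ∀ u ∈ (PySem.List.sorted box (fun x => x) false), u ≠ [] := by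
    intro u hu hnil
    have := h3 u (hperm.mem_iff.mp hu)
    subst hnil
    simp at this
  cases hsort : PySem.List.sorted box (fun x => x) false with
  | nil =>
    exact absurd (hsort ▸ hperm).symm.eq_nil h1
  | cons b0 rest =>
    rw [hsort] at hs hne
    simp only [pileBox, hsort]
    obtain ⟨hfst, hgood⟩ := foldA (b0 :: rest) hs hne rest [(b0, b0.getD 2 0)]
      (by simp) (goodpairs_singleton _ b0)
    congr 1
    have hlen : (rest.foldl aStep [(b0, b0.getD 2 0)]).length = (b0 :: rest).length := by
      have := congrArg List.length hfst
      simpa using this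
    apply List.ext_getElem
    · simpa using hlen
    · intro i hi1 hi2
      have hip : i < (rest.foldl aStep [(b0, b0.getD 2 0)]).length := by
        simpa using hi1
      have his : i < (b0 :: rest).length := by omega
      rw [List.getElem_map, List.getElem_map]
      rw [hgood i hip]
      have hfi : ((rest.foldl aStep [(b0, b0.getD 2 0)])[i]).1 = (b0 :: rest)[i]'his := by
        rw [← List.getElem_map (f := Prod.fst) (h := by simpa using hip)]
        exact List.getElem_of_eq hfst _
      rw [hfi]
      exact (stab (b0 :: rest) hs hne i his (b0 :: rest).length (by omega)).symm

-- ===== VERDICT (by name: the statement is the Claim_ definition above) =====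
theorem pileBox_spec : Claim_equal_pileBox := by
  intro box _ hpre
  obtain ⟨h1, h3⟩ := hpre
  show pileBox box = pileBox_alt box
  have halt : pileBox_alt box = pyMax (box.map (F box box.length)) := by
    rw [pileBox_alt, pileBox_alt_eq]
  have hperm : (PySem.List.sorted box (fun x => x) false).Perm box :=
    PySem.List.sorted_perm box _ false
  have ha := pileBox_eq_spec box h1 h3
  have hmapeq : (PySem.List.sorted box (fun x => x) false).map
        (F (PySem.List.sorted box (fun x => x) false) (PySem.List.sorted box (fun x => x) false).length)
      = (PySem.List.sorted box (fun x => x) false).map (F box box.length) :=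
    List.map_congr_left (fun v _ => by
      rw [F_perm _ box hperm _ v, hperm.length_eq])
  have hpmap : ((PySem.List.sorted box (fun x => x) false).map (F box box.length)).Perm
      (box.map (F box box.length)) := hperm.map _
  have hnomap : (PySem.List.sorted box (fun x => x) false).map (F box box.length) ≠ [] := by
    intro hnil
    rw [List.map_eq_nil_iff] at hnil
    exact h1 (hnil ▸ hperm).symm.eq_nil
  rw [ha, hmapeq, pyMax_perm _ _ hpmap hnomap, halt]
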